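-- pv_equiv track=rewrite | github.com/shingrus/1time.io | scripts/export_redis_stats_to_gsheets.py | merge_daily_rows_by_date
-- ===== SOURCE A (Python) =====
-- from typing import Dict, Iterable, List, Sequence, Tuple
--
-- def merge_daily_rows_by_date(
--     existing_rows: Sequence[Sequence[object]],
--     recalculated_rows: Sequence[Sequence[object]],
-- ) -> List[List[object]]:
--     if not recalculated_rows:
--         return [list(row) for row in existing_rows]
--
--     header = list(recalculated_rows[0])
--     merged_by_date: Dict[str, List[object]] = {}
--
--     for row in existing_rows[1:]:
--         if not row:
--             continue
--         day = str(row[0])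
--         if day:
--             merged_by_date[day] = list(row)
--
--     for row in recalculated_rows[1:]:
--         if not row:
--             continue
--         day = str(row[0])
--         if day:
--             merged_by_date[day] = list(row)
--
--     rows: List[List[object]] = [header]
--     for day in sorted(merged_by_date):
--         rows.append(merged_by_date[day])
--     return rows
-- ===== SOURCE B (Python) =====
-- def merge_daily_rows_by_date(existing_rows, recalculated_rows):
--     if not recalculated_rows:
--         return [list(row) for row in existing_rows]
--     header = list(recalculated_rows[0])
--     rows = [row for row in list(existing_rows[1:]) + list(recalculated_rows[1:])
--             if row and str(row[0])]
--     days = sorted({str(row[0]) for row in rows})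
--     out = [header]
--     for day in days:
--         last = None
--         for row in rows:
--             if str(row[0]) == day:
--                 last = row
--         out.append(list(last))
--     return out
-- ===== Notes on version B (the rewrite author's own statement) =====
-- stated objective: alternative
-- what changed: Replaces the last-write-wins dict with a filtered candidate list, a sorted set of day keys, and a rescan of the candidates per day to pick the last row with that key; no dict is built.
import Mathlib
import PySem

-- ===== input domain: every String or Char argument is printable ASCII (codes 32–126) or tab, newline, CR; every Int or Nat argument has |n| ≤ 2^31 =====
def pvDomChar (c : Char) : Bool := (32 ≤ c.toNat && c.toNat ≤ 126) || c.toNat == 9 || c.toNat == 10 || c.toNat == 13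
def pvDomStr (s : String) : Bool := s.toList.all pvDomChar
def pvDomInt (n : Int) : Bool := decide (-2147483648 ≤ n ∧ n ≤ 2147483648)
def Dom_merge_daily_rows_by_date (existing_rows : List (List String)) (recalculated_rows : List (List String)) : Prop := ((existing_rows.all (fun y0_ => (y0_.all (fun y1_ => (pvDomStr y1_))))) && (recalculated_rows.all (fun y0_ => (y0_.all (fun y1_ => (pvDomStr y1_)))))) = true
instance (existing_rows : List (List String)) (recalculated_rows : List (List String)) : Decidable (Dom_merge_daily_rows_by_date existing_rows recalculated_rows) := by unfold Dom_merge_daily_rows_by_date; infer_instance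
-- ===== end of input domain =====

-- B drops A's dict: it filters the candidate rows once, sorts the set of day keys, and
-- rescans the candidates per day for the last matching row (objective: alternative).

-- ===== PORT A =====
-- one dict-update step of A's two loops: skip empty rows and empty day keys, else d[day] = row
def mergeStepA (d : PySem.Dict String (List String)) (row : List String) : PySem.Dict String (List String) :=
  match row with
  | [] => d
  | day :: _ => if day == "" then d else d.insert day row

def merge_daily_rows_by_date (existing_rows : List (List String)) (recalculated_rows : List (List String)) : List (List String) :=
  match recalculated_rows with
  | [] => existing_rows.map (fun row => row)          -- [list(row) for row in existing_rows]
  | header :: _ =>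
    let d1 := (existing_rows.drop 1).foldl mergeStepA PySem.Dict.empty      -- for row in existing_rows[1:]
    let d2 := (recalculated_rows.drop 1).foldl mergeStepA d1                -- for row in recalculated_rows[1:]
    header :: (PySem.List.sorted d2.keys (fun k => k) false).map (fun day => d2.getD day [])
    -- sorted(merged_by_date); merged_by_date[day] ported as getD day [] (every sorted key is present)

-- ===== PORT B =====
-- str(row[0]) for a present first cell, "" for an empty row (the filter rejects both "" cases)
def rowKeyB (row : List String) : String := row.headD ""

-- the comprehension's filter: if row and str(row[0])
def keepRowB (row : List String) : Bool :=
  match row with | [] => false | day :: _ => !(day == "")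

def merge_daily_rows_by_date_alt (existing_rows : List (List String)) (recalculated_rows : List (List String)) : List (List String) :=
  match recalculated_rows with
  | [] => existing_rows.map (fun row => row)
  | header :: rtl =>
    let rows := ((existing_rows.drop 1) ++ rtl).filter keepRowB
    let days := PySem.List.sorted (PySem.Set.ofList (rows.map rowKeyB)) (fun k => k) false
    header :: days.map (fun day =>
      (rows.foldl (fun last row => if rowKeyB row == day then some row else last) none).getD [])
      -- 'last' starts as None; .getD [] is a total-form guard (a match always exists for day ∈ days)

-- ===== PRECONDITION & SPEC =====
def Spec_merge_daily_rows_by_date (existing_rows : List (List String)) (recalculated_rows : List (List String)) (out : List (List String)) : Prop := out = merge_daily_rows_by_date_alt existing_rows recalculated_rows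
instance (existing_rows : List (List String)) (recalculated_rows : List (List String)) (out : List (List String)) : Decidable (Spec_merge_daily_rows_by_date existing_rows recalculated_rows out) := by unfold Spec_merge_daily_rows_by_date; infer_instance

-- ===== CLAIM (what is proved, stated in full; the proofs are below) =====
def Claim_equal_merge_daily_rows_by_date : Prop := ∀ (existing_rows : List (List String)) (recalculated_rows : List (List String)), Dom_merge_daily_rows_by_date existing_rows recalculated_rows → Spec_merge_daily_rows_by_date existing_rows recalculated_rows (merge_daily_rows_by_date existing_rows recalculated_rows)

-- ===== LEMMAS AND PROOFS =====

-- A's skip-and-insert fold equals a plain insert fold over B's filtered list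
theorem foldA_eq_filter (l : List (List String)) (d : PySem.Dict String (List String)) :
    l.foldl mergeStepA d
      = (l.filter keepRowB).foldl (fun d row => d.insert (rowKeyB row) row) d := by
  induction l generalizing d with
  | nil => rfl
  | cons r t ih =>
    cases r with
    | nil => simpa [mergeStepA, keepRowB] using ih d
    | cons day rest =>
      by_cases h : day = "" <;>
        simp [mergeStepA, keepRowB, h, rowKeyB, List.foldl_cons, ih]

-- lookup in the insert fold = B's last-match rescan
theorem get?_foldl_insert (rows : List (List String)) (d : PySem.Dict String (List String)) (k : String) :
    (rows.foldl (fun d row => d.insert (rowKeyB row) row) d).get? k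
      = rows.foldl (fun last row => if rowKeyB row == k then some row else last) (d.get? k) := by
  induction rows generalizing d with
  | nil => rfl
  | cons r t ih =>
    simp only [List.foldl_cons, ih]
    congr 1
    rw [PySem.Dict.get?_insert]
    by_cases h : rowKeyB r = k
    · simp [h]
    · simp [h, Ne.symm h]

-- ===== VERDICT (by name: the statement is the Claim_ definition above) =====
theorem merge_daily_rows_by_date_spec : Claim_equal_merge_daily_rows_by_date := by
  intro ex rc _
  unfold Spec_merge_daily_rows_by_date merge_daily_rows_by_date merge_daily_rows_by_date_alt
  cases rc with
  | nil => rfl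
  | cons header rtl =>
    simp only [← List.foldl_append, foldA_eq_filter, List.drop_one, List.tail_cons]
    have hkeys : ∀ rows : List (List String),
        (rows.foldl (fun d row => d.insert (rowKeyB row) row) PySem.Dict.empty).keys
          = PySem.Set.ofList (rows.map rowKeyB) := by
      intro rows
      simpa using PySem.Dict.keys_foldl_insert_key rows rowKeyB (fun _ row => row) PySem.Dict.empty
    rw [← List.filter_append, hkeys]
    congr 1
    congr 1
    funext day
    rw [PySem.Dict.getD_eq_get?_getD, get?_foldl_insert, PySem.Dict.get?_empty]
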